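-- pv_equiv track=rewrite | github.com/monsieurTut/capes | functions.py | plus_bas
-- ===== SOURCE A (Python) =====
-- def plus_bas(tab):
--     mint = tab[1][0]
--     imin = 0
--     for i, y in enumerate(tab[1]):
--         if y < mint:
--             imin, mint = i, y
--         elif y == mint:
--             if tab[0][i] < tab[0][imin]:
--                 imin = i
--     return imin
-- ===== SOURCE B (Python) =====
-- def plus_bas(tab):
--     xs, ys = tab[0], tab[1]
--     mint = min(ys)
--     candidates = [i for i, y in enumerate(ys) if y == mint]
--     if len(candidates) == 1:
--         return candidates[0]
--     return min(candidates, key=lambda i: xs[i])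
-- ===== Notes on version B (the rewrite author's own statement) =====
-- stated objective: alternative
-- what changed: Replaced the single fused scan with its nested lexicographic tie-break by separate passes: compute min(tab[1]), collect the indices attaining it, return it directly if unique, otherwise take the earliest candidate with minimal tab[0] value via min(..., key=...); Pre_ excludes exactly the inputs on which A raises IndexError (fewer than two rows, empty tab[1], or a prefix-minimum tie position at or beyond len(tab[0])).
import Mathlib
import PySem

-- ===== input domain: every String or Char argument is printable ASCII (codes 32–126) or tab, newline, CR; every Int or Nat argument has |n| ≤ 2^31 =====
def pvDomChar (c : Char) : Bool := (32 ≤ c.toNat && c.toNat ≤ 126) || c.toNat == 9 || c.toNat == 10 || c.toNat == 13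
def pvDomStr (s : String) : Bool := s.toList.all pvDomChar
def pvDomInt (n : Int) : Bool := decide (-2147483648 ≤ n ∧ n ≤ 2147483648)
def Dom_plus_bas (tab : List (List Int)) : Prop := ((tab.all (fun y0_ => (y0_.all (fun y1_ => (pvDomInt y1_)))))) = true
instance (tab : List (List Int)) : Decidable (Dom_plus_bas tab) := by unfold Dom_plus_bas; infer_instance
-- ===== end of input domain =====

-- B replaces A's fused scan (running min with a nested tie-break on tab[0]) by separate passes:
-- min of tab[1], the list of indices attaining it, that index if unique, else the earliest one
-- with minimal tab[0] value.

-- ===== PORT A =====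
-- literal transliteration of A: a left fold over enumerate(tab[1]) carrying (imin, mint);
-- list accesses use PySem.List.pyGetD with a default, exact on Pre_ (where Python A does not raise)
def plus_bas (tab : List (List Int)) : Int :=
  let row1 := PySem.List.pyGetD tab 1 []
  let row0 := PySem.List.pyGetD tab 0 []
  let mint0 := PySem.List.pyGetD row1 0 0
  let s := (PySem.List.enumerate row1).foldl
    (fun (s : Int × Int) (iy : Int × Int) =>
      if iy.2 < s.2 then (iy.1, iy.2)
      else if iy.2 = s.2 then
        (if PySem.List.pyGetD row0 iy.1 0 < PySem.List.pyGetD row0 s.1 0 then (iy.1, s.2) else s)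
      else s)
    ((0 : Int), mint0)
  s.1

-- ===== PORT B =====
-- literal transliteration of B: min of tab[1], candidate indices, the unique-minimum shortcut,
-- else min-by-key over the candidates
def plus_bas_alt (tab : List (List Int)) : Int :=
  let xs := PySem.List.pyGetD tab 0 []
  let ys := PySem.List.pyGetD tab 1 []
  let mint := (PySem.List.min? ys (fun y => y)).getD 0
  let candidates := ((PySem.List.enumerate ys).filter (fun p => p.2 == mint)).map (fun p => p.1)
  if candidates.length = 1 then PySem.List.pyGetD candidates 0 0
  else (PySem.List.min? candidates (fun i => PySem.List.pyGetD xs i 0)).getD 0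

-- ===== PRECONDITION & SPEC =====
-- Pre_ is exactly the set of inputs on which Python A returns (no IndexError): at least two rows,
-- tab[1] nonempty, tab[0] nonempty (A always reads tab[0][0]), and every later position whose
-- value equals the minimum of the strictly earlier tab[1] prefix (a tie step, where A reads
-- tab[0][i]) lies inside tab[0].
def Pre_plus_bas (tab : List (List Int)) : Prop :=
  2 ≤ tab.length ∧ PySem.List.pyGetD tab 1 [] ≠ [] ∧
  0 < (PySem.List.pyGetD tab 0 []).length ∧
  ∀ i : Nat, i < (PySem.List.pyGetD tab 1 []).length →
    (1 ≤ i →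
      PySem.List.min? ((PySem.List.pyGetD tab 1 []).take i) (fun y => y)
        = some ((PySem.List.pyGetD tab 1 []).getD i 0) →
      i < (PySem.List.pyGetD tab 0 []).length)
instance (tab : List (List Int)) : Decidable (Pre_plus_bas tab) := by
  unfold Pre_plus_bas; infer_instance
def pvWitness_plus_bas : List (List Int) := [[0], [0]]

def Spec_plus_bas (tab : List (List Int)) (out : Int) : Prop := out = plus_bas_alt tab
instance (tab : List (List Int)) (out : Int) : Decidable (Spec_plus_bas tab out) := by
  unfold Spec_plus_bas; infer_instance

-- ===== CLAIM (what is proved, stated in full; the proofs are below) =====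
def Claim_equal_plus_bas : Prop :=
  ∀ (tab : List (List Int)), Dom_plus_bas tab → Pre_plus_bas tab → Spec_plus_bas tab (plus_bas tab)

-- ===== LEMMAS AND PROOFS =====

-- the body of A's fold, named for the proofs (definitionally the lambda in plus_bas)
def pvStep (xs : List Int) (s iy : Int × Int) : Int × Int :=
  if iy.2 < s.2 then (iy.1, iy.2)
  else if iy.2 = s.2 then
    (if PySem.List.pyGetD xs iy.1 0 < PySem.List.pyGetD xs s.1 0 then (iy.1, s.2) else s)
  else s

-- min-by-key over the candidate indices, as a function of the two rows (B without the shortcut)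
def pvAlt (xs ys : List Int) : Int :=
  (PySem.List.min?
    (((PySem.List.enumerate ys).filter
        (fun p => p.2 == (PySem.List.min? ys (fun y => y)).getD 0)).map (fun p => p.1))
    (fun i => PySem.List.pyGetD xs i 0)).getD 0

lemma plus_bas_eq (tab : List (List Int)) :
    plus_bas tab =
      ((PySem.List.enumerate (PySem.List.pyGetD tab 1 [])).foldl
        (pvStep (PySem.List.pyGetD tab 0 []))
        ((0 : Int), PySem.List.pyGetD (PySem.List.pyGetD tab 1 []) 0 0)).1 := rfl

-- B's shortcut branch coincides with the min-by-key over a one-element candidate list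
lemma pv_short (cands : List Int) (key : Int → Int) :
    (if cands.length = 1 then PySem.List.pyGetD cands 0 0
     else (PySem.List.min? cands key).getD 0)
      = (PySem.List.min? cands key).getD 0 := by
  by_cases h : cands.length = 1
  · rw [List.length_eq_one_iff] at h
    obtain ⟨c, rfl⟩ := h
    simp [PySem.List.min?, PySem.List.pyGetD_zero_cons]
  · rw [if_neg h]

lemma plus_bas_alt_eq (tab : List (List Int)) :
    plus_bas_alt tab = pvAlt (PySem.List.pyGetD tab 0 []) (PySem.List.pyGetD tab 1 []) :=
  pv_short _ _

lemma pv_min?_append_singleton {α κ : Type} [LT κ] [DecidableLT κ]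
    (l : List α) (a : α) (key : α → κ) :
    PySem.List.min? (l ++ [a]) key =
      match PySem.List.min? l key with
      | none => some a
      | some b => if key a < key b then some a else some b := by
  simp only [PySem.List.min?, List.foldl_append, List.foldl_cons, List.foldl_nil]
  rfl

lemma pv_foldl_some {α κ : Type} [LT κ] [DecidableLT κ] (key : α → κ) :
    ∀ (t : List α) (m : α),
      t.foldl (fun acc x => match acc with
        | none => some x
        | some m => if key x < key m then some x else some m) (some m) ≠ none := by
  intro t
  induction t with
  | nil => intro m h; simp at h
  | cons b t ih =>
    intro m
    simp only [List.foldl_cons]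
    by_cases h : key b < key m <;> simp only [h, if_true, if_false] <;> exact ih _

lemma pv_min?_ne_none {α κ : Type} [LT κ] [DecidableLT κ] (l : List α) (key : α → κ)
    (hl : l ≠ []) : PySem.List.min? l key ≠ none := by
  cases l with
  | nil => exact absurd rfl hl
  | cons a t =>
    simp only [PySem.List.min?, List.foldl_cons]
    exact pv_foldl_some key t a

lemma pv_getD_ite (c : Prop) [Decidable c] (a b : Int) :
    (if c then some a else some b).getD 0 = if c then a else b := by
  by_cases h : c <;> simp [h]

lemma pv_ite_pair (c : Prop) [Decidable c] (a b y : Int) :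
    (if c then (a, y) else (b, y)) = ((if c then a else b), y) := by
  by_cases h : c <;> simp [h]

lemma pv_snd_mem_of_mem_enumerate {α : Type} {l : List α} {p : Int × α}
    (h : p ∈ PySem.List.enumerate l 0) : p.2 ∈ l := by
  rw [PySem.List.mem_enumerate_iff] at h
  obtain ⟨k, hk, rfl⟩ := h
  exact List.getElem_mem hk

lemma pv_enum_filter_ne_nil {l : List Int} {m : Int} (hm : m ∈ l) :
    (PySem.List.enumerate l 0).filter (fun p => p.2 == m) ≠ [] := by
  obtain ⟨k, hk, rfl⟩ := List.getElem_of_mem hm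
  intro hnil
  rw [List.filter_eq_nil_iff] at hnil
  have hmem : ((0 : Int) + (k : Int), l[k]) ∈ PySem.List.enumerate l 0 :=
    (PySem.List.mem_enumerate_iff l 0 _).2 ⟨k, hk, rfl⟩
  have := hnil _ hmem
  simp at this

-- main invariant: A's fold over ys computes (B's min-by-key value, min ys)
lemma pv_main (xs : List Int) :
    ∀ (ys : List Int), ys ≠ [] →
      (PySem.List.enumerate ys).foldl (pvStep xs) ((0 : Int), PySem.List.pyGetD ys 0 0)
        = (pvAlt xs ys, (PySem.List.min? ys (fun y => y)).getD 0) := by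
  intro ys
  induction ys using List.reverseRecOn with
  | nil => intro h; exact absurd rfl h
  | append_singleton l y IH =>
    intro _
    rcases eq_or_ne l [] with rfl | hl
    · simp [pvStep, pvAlt, PySem.List.min?, PySem.List.pyGetD_zero_cons,
        PySem.List.enumerate_cons, PySem.List.enumerate_nil]
    · have hfold := IH hl
      obtain ⟨m, hm⟩ : ∃ m, PySem.List.min? l (fun y => y) = some m := by
        cases h : PySem.List.min? l (fun y => y) with
        | none => exact absurd h (pv_min?_ne_none l _ hl)
        | some m => exact ⟨m, rfl⟩
      have hmem : m ∈ l := PySem.List.min?_mem hm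
      have hminl : ∀ z ∈ l, m ≤ z := fun z hz => PySem.List.min?_isMin hm z hz
      have hhead : PySem.List.pyGetD (l ++ [y]) 0 0 = PySem.List.pyGetD l 0 0 := by
        cases l with
        | nil => exact absurd rfl hl
        | cons a t => simp [PySem.List.pyGetD_zero_cons]
      have henum : PySem.List.enumerate (l ++ [y]) 0
          = PySem.List.enumerate l 0 ++ [((l.length : Int), y)] := by
        simpa [PySem.List.enumerate_cons, PySem.List.enumerate_nil]
          using PySem.List.enumerate_append l [y] 0
      have hminapp : PySem.List.min? (l ++ [y]) (fun y => y)
          = some (if y < m then y else m) := by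
        rw [pv_min?_append_singleton, hm]
        by_cases h : y < m <;> simp [h]
      rw [henum, List.foldl_append, hhead, hfold, hm, Option.getD_some,
        List.foldl_cons, List.foldl_nil]
      rcases lt_trichotomy y m with hlt | heq | hgt
      · have hmint : (PySem.List.min? (l ++ [y]) (fun y => y)).getD 0 = y := by
          rw [hminapp]; simp [hlt]
        have h1 : (PySem.List.enumerate l 0).filter (fun p => p.2 == y) = [] := by
          rw [List.filter_eq_nil_iff]
          intro p hp
          have := hminl p.2 (pv_snd_mem_of_mem_enumerate hp)
          simp only [beq_iff_eq]
          omega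
        have hAlt : pvAlt xs (l ++ [y]) = (l.length : Int) := by
          unfold pvAlt
          rw [hmint, henum, List.filter_append, h1]
          simp [PySem.List.min?]
        rw [hAlt]
        simp [pvStep, hlt, hmint]
      · subst heq
        have hmint : (PySem.List.min? (l ++ [y]) (fun y => y)).getD 0 = y := by
          rw [hminapp]; simp
        obtain ⟨b, hb⟩ : ∃ b, PySem.List.min?
            (((PySem.List.enumerate l 0).filter (fun p => p.2 == y)).map (fun p => p.1))
            (fun i => PySem.List.pyGetD xs i 0) = some b := by
          cases h : PySem.List.min?
              (((PySem.List.enumerate l 0).filter (fun p => p.2 == y)).map (fun p => p.1))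
              (fun i => PySem.List.pyGetD xs i 0) with
          | none =>
            refine absurd h (pv_min?_ne_none _ _ ?_)
            intro h0
            exact pv_enum_filter_ne_nil hmem (List.map_eq_nil_iff.mp h0)
          | some b => exact ⟨b, rfl⟩
        have hAltl : pvAlt xs l = b := by
          unfold pvAlt
          rw [hm, Option.getD_some, hb, Option.getD_some]
        have hAlt : pvAlt xs (l ++ [y])
            = if PySem.List.pyGetD xs (l.length : Int) 0 < PySem.List.pyGetD xs b 0
              then (l.length : Int) else b := by
          unfold pvAlt
          rw [hmint, henum, List.filter_append, List.map_append]
          simp only [List.filter_cons, List.filter_nil, beq_self_eq_true, if_true,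
            List.map_cons, List.map_nil]
          rw [pv_min?_append_singleton, hb]
          exact pv_getD_ite _ _ _
        rw [hAlt, hAltl, hmint]
        simp only [pvStep, lt_irrefl, if_false]
        exact pv_ite_pair _ _ _ _
      · have h1 : ¬ y < m := by omega
        have h2 : (y == m) = false := by simp only [beq_eq_false_iff_ne, ne_eq]; omega
        have h3 : ¬ y = m := by omega
        have hmint : (PySem.List.min? (l ++ [y]) (fun y => y)).getD 0 = m := by
          rw [hminapp]; simp [h1]
        have hAlt : pvAlt xs (l ++ [y]) = pvAlt xs l := by
          unfold pvAlt
          rw [hminapp, hm]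
          simp only [Option.getD_some, if_neg h1, henum, List.filter_append,
            List.filter_cons, h2, List.filter_nil]
          simp
        rw [hAlt, hmint]
        simp [pvStep, h1, h3]

-- ===== VERDICT (by name: the statement is the Claim_ definition above) =====
theorem plus_bas_spec : Claim_equal_plus_bas := by
  intro tab _ hpre
  show plus_bas tab = plus_bas_alt tab
  rw [plus_bas_eq, plus_bas_alt_eq]
  rw [pv_main _ _ hpre.2.1]
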